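-- pv_equiv track=rewrite | github.com/michi-system/Reseller | reselling/live_miner_fetch.py | _is_specific_model_code
-- ===== SOURCE A (Python) =====
-- def _is_specific_model_code(code: str) -> bool:
--     token = str(code or "").strip().upper()
--     if not token:
--         return False
--     alpha = sum(1 for ch in token if "A" <= ch <= "Z")
--     digit = sum(1 for ch in token if ch.isdigit())
--     if alpha < 2 or digit < 2:
--         return False
--     return len(token) >= 6 or token.count("-") >= 1
-- ===== SOURCE B (Python) =====
-- def _is_specific_model_code(code: str) -> bool:
--     # Short-circuit streaming scanner: saturating "still needed" countdowns and a
--     # monotone acceptance flag; returns True the moment the predicate is decided,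
--     # instead of staged full counts followed by threshold comparisons.
--     token = str(code or "").strip().upper()
--     need_alpha, need_digit = 2, 2
--     accepted_tail = len(token) >= 6  # becomes True also when a hyphen is seen
--     for ch in token:
--         if need_alpha and "A" <= ch <= "Z":
--             need_alpha -= 1
--         if need_digit and ch.isdigit():
--             need_digit -= 1
--         if ch == "-":
--             accepted_tail = True
--         if not need_alpha and not need_digit and accepted_tail:
--             return True
--     return False
-- ===== Notes on version B (the rewrite author's own statement) =====
-- stated objective: alternative
-- what changed: Replaces A's staged full counts (two counting comprehensions plus a hyphen count, then threshold comparisons) with a short-circuit streaming scanner that keeps saturating need-counters and a monotone acceptance flag and returns True as soon as the predicate is decided, with no post-loop comparisons.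
import Mathlib
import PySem

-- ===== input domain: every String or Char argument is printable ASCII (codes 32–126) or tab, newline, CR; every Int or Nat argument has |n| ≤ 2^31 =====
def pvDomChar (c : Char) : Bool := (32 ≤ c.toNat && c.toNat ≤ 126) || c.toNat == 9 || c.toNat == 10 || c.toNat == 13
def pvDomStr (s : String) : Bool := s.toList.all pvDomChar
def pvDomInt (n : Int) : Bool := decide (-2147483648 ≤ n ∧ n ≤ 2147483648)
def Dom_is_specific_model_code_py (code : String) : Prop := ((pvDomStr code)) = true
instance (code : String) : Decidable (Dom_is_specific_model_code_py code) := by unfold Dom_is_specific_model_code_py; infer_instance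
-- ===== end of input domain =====

-- B replaces A's three staged counting passes with a short-circuit streaming scanner (saturating need-counters, early True); alternative decomposition, same results.


-- ===== PORT A =====
def is_specific_model_code_py (code : String) : Bool :=
  let token := PySem.Chars.upper (PySem.Chars.strip code.toList)
  if token.isEmpty then false
  else
    let alpha := token.countP (fun ch => decide ('A' ≤ ch ∧ ch ≤ 'Z'))
    let digit := token.countP (fun ch => PySem.Chars.isdigit ch)
    if alpha < 2 ∨ digit < 2 then false
    else decide (token.length ≥ 6 ∨ PySem.Chars.count token ['-'] ≥ 1)

-- ===== PORT B =====
-- B's for-loop with its early `return True`, as structural recursion over the remaining characters: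
-- state = (still-needed letters, still-needed digits, acceptance flag).
def pvScanB : List Char → Nat → Nat → Bool → Bool
  | [], _, _, _ => false
  | ch :: t, na, nd, ok =>
    let na' := if na ≠ 0 ∧ 'A' ≤ ch ∧ ch ≤ 'Z' then na - 1 else na
    let nd' := if nd ≠ 0 ∧ PySem.Chars.isdigit ch then nd - 1 else nd
    let ok' := if ch = '-' then true else ok
    if na' = 0 ∧ nd' = 0 ∧ ok' = true then true else pvScanB t na' nd' ok'

def is_specific_model_code_py_alt (code : String) : Bool :=
  let token := PySem.Chars.upper (PySem.Chars.strip code.toList)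
  pvScanB token 2 2 (decide (token.length ≥ 6))

-- ===== PRECONDITION & SPEC =====
def Spec_is_specific_model_code_py (code : String) (out : Bool) : Prop := out = is_specific_model_code_py_alt code
instance (code : String) (out : Bool) : Decidable (Spec_is_specific_model_code_py code out) := by unfold Spec_is_specific_model_code_py; infer_instance

-- ===== CLAIM (what is proved, stated in full; the proofs are below) =====
def Claim_equal_is_specific_model_code_py : Prop := ∀ (code : String), Dom_is_specific_model_code_py code → Spec_is_specific_model_code_py code (is_specific_model_code_py code)

-- ===== LEMMAS AND PROOFS =====

-- PySem.Chars.count with a single-character needle counts exactly the occurrences of that character.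
theorem pv_go_cnt (fuel : Nat) : ∀ (l : List Char) (acc : Nat), l.length ≤ fuel →
    PySem.Chars.count.go ['-'] fuel l acc = acc + l.count '-' := by
  induction fuel with
  | zero => intro l acc h
            have : l = [] := List.eq_nil_of_length_eq_zero (Nat.le_zero.mp h)
            subst this; simp [PySem.Chars.count.go]
  | succ n ih =>
    intro l acc h
    cases l with
    | nil => simp [PySem.Chars.count.go]
    | cons c t =>
      rw [PySem.Chars.count.go]
      simp only [List.length_cons, Nat.succ_le_succ_iff] at h
      by_cases hc : c = '-'
      · subst hc
        simp [List.isPrefixOf, ih t (acc+1) h]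
        omega
      · simp [List.isPrefixOf, Ne.symm hc, hc, ih t acc h]

theorem pv_count_hyphen (s : List Char) : PySem.Chars.count s ['-'] = s.count '-' := by
  simpa [PySem.Chars.count] using pv_go_cnt s.length s 0 le_rfl

-- The early-exit scanner decides exactly "nonempty ∧ enough letters ∧ enough digits ∧ (flag ∨ a hyphen occurs)":
-- its acceptance condition is monotone along the scan, so exiting at the first point where it holds
-- agrees with checking it after the whole list has been consumed.
theorem pv_scan_eq (l : List Char) : ∀ (na nd : Nat) (ok : Bool),
    pvScanB l na nd ok =
      (decide (l ≠ []) && decide (na ≤ l.countP (fun ch => decide ('A' ≤ ch ∧ ch ≤ 'Z')))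
        && decide (nd ≤ l.countP (fun ch => PySem.Chars.isdigit ch)) && (ok || decide ('-' ∈ l))) := by
  induction l with
  | nil => intro na nd ok; simp [pvScanB]
  | cons c t ih =>
    intro na nd ok
    rw [pvScanB]
    set na' := if na ≠ 0 ∧ 'A' ≤ c ∧ c ≤ 'Z' then na - 1 else na with hna'
    set nd' := if nd ≠ 0 ∧ PySem.Chars.isdigit c then nd - 1 else nd with hnd'
    set ok' := if c = '-' then true else ok with hok'
    have hA : decide (na ≤ (c :: t).countP (fun ch => decide ('A' ≤ ch ∧ ch ≤ 'Z')))
        = decide (na' ≤ t.countP (fun ch => decide ('A' ≤ ch ∧ ch ≤ 'Z'))) := by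
      rw [List.countP_cons, hna']
      by_cases ha : 'A' ≤ c ∧ c ≤ 'Z' <;> by_cases h0 : na = 0 <;>
        simp [ha, h0] <;> omega
    have hD : decide (nd ≤ (c :: t).countP (fun ch => PySem.Chars.isdigit ch))
        = decide (nd' ≤ t.countP (fun ch => PySem.Chars.isdigit ch)) := by
      rw [List.countP_cons, hnd']
      by_cases hd : PySem.Chars.isdigit c = true <;> by_cases h0 : nd = 0 <;>
        simp [hd, h0] <;> omega
    have hO : (ok || decide ('-' ∈ c :: t)) = (ok' || decide ('-' ∈ t)) := by
      rw [hok']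
      by_cases hc : c = '-' <;> cases ok <;> simp [hc, List.mem_cons] <;> tauto
    simp only [ne_eq, reduceCtorEq, not_false_eq_true, decide_true, Bool.true_and, hA, hD, hO]
    split_ifs with h
    · obtain ⟨h1, h2, h3⟩ := h
      simp [h1, h2, h3]
    · rw [ih]
      by_cases ht : t = []
      · subst ht
        simp only [List.countP_nil, List.not_mem_nil, decide_false, Bool.or_false,
          Nat.le_zero, ne_eq, not_true_eq_false, Bool.false_and]
        by_cases h1 : na' = 0
        · by_cases h2 : nd' = 0
          · have h3 : ok' = false := by
              cases h3 : ok'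
              · rfl
              · exact absurd ⟨h1, h2, h3⟩ h
            simp [h1, h2, h3]
          · simp [h2]
        · simp [h1]
      · simp [ht]

-- ===== VERDICT (by name: the statement is the Claim_ definition above) =====
theorem is_specific_model_code_py_spec : Claim_equal_is_specific_model_code_py := by
  intro code _
  unfold Spec_is_specific_model_code_py is_specific_model_code_py is_specific_model_code_py_alt
  rw [pv_scan_eq]
  set token := PySem.Chars.upper (PySem.Chars.strip code.toList) with htok
  by_cases hne : token = []
  · simp [hne]
  · have hcnt : (1 ≤ token.count '-') ↔ ('-' ∈ token) := List.one_le_count_iff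
    simp only [List.isEmpty_iff, hne, if_neg hne, ne_eq, not_false_eq_true, decide_true,
      Bool.true_and, pv_count_hyphen]
    by_cases ha : token.countP (fun ch => decide ('A' ≤ ch ∧ ch ≤ 'Z')) < 2
    · have h2 : ¬(2 ≤ token.countP (fun ch => decide ('A' ≤ ch ∧ ch ≤ 'Z'))) := by omega
      rw [if_pos (Or.inl ha)]
      simp only [Bool.decide_and] at h2
      simp [h2]
    · by_cases hd : token.countP (fun ch => PySem.Chars.isdigit ch) < 2
      · have h2 : ¬(2 ≤ token.countP (fun ch => PySem.Chars.isdigit ch)) := by omega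
        rw [if_pos (Or.inr hd)]
        simp [h2]
      · have hor : ¬(token.countP (fun ch => decide ('A' ≤ ch ∧ ch ≤ 'Z')) < 2 ∨
            token.countP (fun ch => PySem.Chars.isdigit ch) < 2) := by tauto
        rw [if_neg hor]
        by_cases hl : token.length ≥ 6 <;> by_cases hm : '-' ∈ token <;>
          simp_all <;> omega
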